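-- pv_equiv track=rewrite | github.com/pypi-data/pypi-mirror-396 | packages/heapx/heapx-0.0.3.tar.gz/heapx-0.0.3/tests/test_sequence.py | is_valid_heap
-- ===== SOURCE A (Python) =====
-- from typing import List, Any
--
-- def is_valid_heap(arr: List[Any], max_heap: bool = False, arity: int = 2) -> bool:
--   """Verify heap property for n-ary heap."""
--   n = len(arr)
--   for i in range(n):
--     for j in range(1, arity + 1):
--       child = arity * i + j
--       if child >= n:
--         break
--       if max_heap:
--         if arr[i] < arr[child]:
--           return False
--       else:
--         if arr[i] > arr[child]:
--           return False
--   return True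
-- ===== SOURCE B (Python) =====
-- def is_valid_heap(arr, max_heap=False, arity=2):
--   """Verify heap property for n-ary heap."""
--   if arity < 1:
--     return True
--   n = len(arr)
--   for c in range(1, n):
--     parent = (c - 1) // arity
--     if arr[parent] < arr[c] if max_heap else arr[parent] > arr[c]:
--       return False
--   return True
-- ===== Notes on version B (the rewrite author's own statement) =====
-- stated objective: simpler
-- what changed: Replaces A's nested parent-over-children loops (with a break when a child index runs past the end) by a single flat loop over child indices c in range(1, n) that computes the parent as (c-1)//arity, guarded by an up-front 'arity < 1: return True' mirroring A's empty inner range.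
import Mathlib
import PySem

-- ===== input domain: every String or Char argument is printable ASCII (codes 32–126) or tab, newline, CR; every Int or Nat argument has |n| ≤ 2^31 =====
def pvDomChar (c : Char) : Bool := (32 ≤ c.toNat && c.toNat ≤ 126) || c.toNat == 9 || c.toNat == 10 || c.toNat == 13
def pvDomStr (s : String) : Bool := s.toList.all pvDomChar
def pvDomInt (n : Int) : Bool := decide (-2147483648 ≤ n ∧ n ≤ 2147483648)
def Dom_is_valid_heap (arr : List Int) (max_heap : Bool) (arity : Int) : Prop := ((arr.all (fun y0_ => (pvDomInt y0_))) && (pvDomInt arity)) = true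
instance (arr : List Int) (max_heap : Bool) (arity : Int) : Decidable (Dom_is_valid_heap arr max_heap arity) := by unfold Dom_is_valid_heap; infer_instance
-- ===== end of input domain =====

-- B replaces A's nested parent→children loops by one flat loop over child indices
-- computing parent = (c-1)//arity; objective: simpler (same O(n) cost).

-- ===== PORT A =====
-- inner 'for j in range(1, arity+1)' consumed lazily (as Python's range is), with its break
-- and the two possible early 'return False'; j is the loop counter
def pvAInner (arr : List Int) (max_heap : Bool) (arity n i j : Int) : Bool :=
  if j ≥ arity + 1 then true
  else
    let child := arity * i + j
    if child ≥ n then true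
    else if (if max_heap then PySem.List.pyGetD arr i 0 < PySem.List.pyGetD arr child 0
             else PySem.List.pyGetD arr i 0 > PySem.List.pyGetD arr child 0) then false
    else pvAInner arr max_heap arity n i (j + 1)
termination_by (arity + 1 - j).toNat
decreasing_by omega

-- outer 'for i in range(n)'
def pvAOuter (arr : List Int) (max_heap : Bool) (arity n : Int) : List Int → Bool
  | [] => true
  | i :: is_ =>
    if pvAInner arr max_heap arity n i 1 then
      pvAOuter arr max_heap arity n is_
    else false

def is_valid_heap (arr : List Int) (max_heap : Bool) (arity : Int) : Bool :=
  pvAOuter arr max_heap arity (arr.length : Int) (PySem.List.pyRange 0 (arr.length : Int) 1)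

-- ===== PORT B =====
-- 'for c in range(1, n)' with parent = (c-1)//arity
def pvBLoop (arr : List Int) (max_heap : Bool) (arity : Int) : List Int → Bool
  | [] => true
  | c :: cs =>
    let parent := PySem.Int.floordiv (c - 1) arity
    if (if max_heap then PySem.List.pyGetD arr parent 0 < PySem.List.pyGetD arr c 0
        else PySem.List.pyGetD arr parent 0 > PySem.List.pyGetD arr c 0) then false
    else pvBLoop arr max_heap arity cs

def is_valid_heap_alt (arr : List Int) (max_heap : Bool) (arity : Int) : Bool :=
  if arity < 1 then true
  else pvBLoop arr max_heap arity (PySem.List.pyRange 1 (arr.length : Int) 1)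

-- ===== PRECONDITION & SPEC =====
def Spec_is_valid_heap (arr : List Int) (max_heap : Bool) (arity : Int) (out : Bool) : Prop := out = is_valid_heap_alt arr max_heap arity
instance (arr : List Int) (max_heap : Bool) (arity : Int) (out : Bool) : Decidable (Spec_is_valid_heap arr max_heap arity out) := by unfold Spec_is_valid_heap; infer_instance

-- ===== CLAIM (what is proved, stated in full; the proofs are below) =====
def Claim_equal_is_valid_heap : Prop := ∀ (arr : List Int) (max_heap : Bool) (arity : Int), Dom_is_valid_heap arr max_heap arity → Spec_is_valid_heap arr max_heap arity (is_valid_heap arr max_heap arity)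

-- ===== LEMMAS AND PROOFS =====

-- the (boolean) heap-edge violation both programs test
def pvViol (arr : List Int) (max_heap : Bool) (p c : Int) : Bool :=
  if max_heap then PySem.List.pyGetD arr p 0 < PySem.List.pyGetD arr c 0
  else PySem.List.pyGetD arr p 0 > PySem.List.pyGetD arr c 0

theorem pvAInner_empty (arr : List Int) (mh : Bool) (arity n i : Int) (h : arity < 1) :
    pvAInner arr mh arity n i 1 = true := by
  rw [pvAInner, if_pos (by omega)]

theorem pvAOuter_trivial (arr : List Int) (mh : Bool) (arity n : Int) (h : arity < 1)
    (is_ : List Int) : pvAOuter arr mh arity n is_ = true := by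
  induction is_ with
  | nil => rfl
  | cons i is ih => simp [pvAOuter, pvAInner_empty arr mh arity n i h, ih]

theorem pvBLoop_char (arr : List Int) (mh : Bool) (arity : Int) (cs : List Int) :
    pvBLoop arr mh arity cs = true ↔
      ∀ c ∈ cs, pvViol arr mh (PySem.Int.floordiv (c - 1) arity) c = false := by
  induction cs with
  | nil => simp [pvBLoop]
  | cons c cs ih =>
    rw [show pvBLoop arr mh arity (c :: cs) =
        (if pvViol arr mh (PySem.Int.floordiv (c - 1) arity) c then false
         else pvBLoop arr mh arity cs) by cases mh <;> simp [pvBLoop, pvViol]]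
    by_cases hv : pvViol arr mh (PySem.Int.floordiv (c - 1) arity) c = true
    · rw [if_pos hv]
      constructor
      · intro hc; cases hc
      · intro hall
        rw [hall c (List.mem_cons_self ..)] at hv; cases hv
    · rw [if_neg hv, ih]
      constructor
      · intro hall c' hc'
        rcases List.mem_cons.mp hc' with rfl | hm
        · exact Bool.not_eq_true _ ▸ (by simpa using hv)
        · exact hall c' hm
      · intro hall c' hc'; exact hall c' (List.mem_cons_of_mem _ hc')

theorem pvAInner_char (arr : List Int) (mh : Bool) (arity n i : Int) (lo : Int) :
    pvAInner arr mh arity n i lo = true ↔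
      ∀ j, lo ≤ j → j < arity + 1 → arity * i + j < n → pvViol arr mh i (arity * i + j) = false := by
  by_cases hlo : lo ≥ arity + 1
  · rw [pvAInner, if_pos hlo]
    constructor
    · intro _ j h1 h2 _; omega
    · intro _; rfl
  · rw [show pvAInner arr mh arity n i lo =
        (if arity * i + lo ≥ n then true
         else if pvViol arr mh i (arity * i + lo) then false
         else pvAInner arr mh arity n i (lo + 1)) by
          rw [pvAInner, if_neg hlo]; cases mh <;> simp [pvViol]]
    by_cases hbig : arity * i + lo ≥ n
    · rw [if_pos hbig]
      constructor
      · intro _ j h1 _ hn; exact absurd hn (by omega)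
      · intro _; rfl
    · rw [if_neg hbig]
      by_cases hv : pvViol arr mh i (arity * i + lo) = true
      · rw [if_pos hv]
        constructor
        · intro hc; cases hc
        · intro hall
          rw [hall lo le_rfl (by omega) (by omega)] at hv; cases hv
      · rw [if_neg hv, pvAInner_char arr mh arity n i (lo + 1)]
        -- (recursive use of this characterisation)
        constructor
        · intro hall j h1 h2 hn
          rcases eq_or_lt_of_le h1 with rfl | hlt
          · simpa using hv
          · exact hall j (by omega) h2 hn
        · intro hall j h1 h2 hn; exact hall j (by omega) h2 hn
termination_by (arity + 1 - lo).toNat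
decreasing_by omega

theorem pvAOuter_char (arr : List Int) (mh : Bool) (arity n : Int) (is_ : List Int) :
    pvAOuter arr mh arity n is_ = true ↔
      ∀ i ∈ is_, pvAInner arr mh arity n i 1 = true := by
  induction is_ with
  | nil => simp [pvAOuter]
  | cons i is ih =>
    rw [show pvAOuter arr mh arity n (i :: is) =
        (if pvAInner arr mh arity n i 1 then
          pvAOuter arr mh arity n is else false) from rfl]
    by_cases h : pvAInner arr mh arity n i 1 = true
    · rw [if_pos h, ih]
      constructor
      · intro hall i' hi'
        rcases List.mem_cons.mp hi' with rfl | hm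
        · exact h
        · exact hall i' hm
      · intro hall i' hi'; exact hall i' (List.mem_cons_of_mem _ hi')
    · rw [if_neg h]
      constructor
      · intro hc; cases hc
      · intro hall; exact absurd (hall i (List.mem_cons_self ..)) h

-- ===== VERDICT (by name: the statement is the Claim_ definition above) =====
theorem is_valid_heap_spec : Claim_equal_is_valid_heap := by
  intro arr mh arity _
  unfold Spec_is_valid_heap is_valid_heap is_valid_heap_alt
  by_cases har : arity < 1
  · rw [if_pos har]
    exact pvAOuter_trivial arr mh arity _ har _
  · rw [if_neg har]
    rw [Bool.eq_iff_iff, pvAOuter_char, pvBLoop_char]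
    constructor
    · -- every parent→child edge checked by A ok → B's edges ok
      intro hall c hc
      rw [PySem.List.mem_pyRange_one] at hc
      have hq0 : 0 ≤ (c - 1) / arity := Int.ediv_nonneg (by omega) (by omega)
      have hdm := Int.mul_ediv_add_emod (c - 1) arity
      have hm0 : 0 ≤ (c - 1) % arity := Int.emod_nonneg _ (by omega)
      have hm1 : (c - 1) % arity < arity := Int.emod_lt_of_pos _ (by omega)
      have hii : (c - 1) / arity ≤ arity * ((c - 1) / arity) :=
        le_mul_of_one_le_left hq0 (by omega)
      rw [PySem.Int.floordiv_eq_ediv_of_pos (by omega)]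
      have hsum : arity * ((c - 1) / arity) + (c - arity * ((c - 1) / arity)) = c := by ring
      have := (pvAInner_char arr mh arity _ ((c - 1) / arity) 1).mp
        (hall _ (by rw [PySem.List.mem_pyRange_one]; omega))
        (c - arity * ((c - 1) / arity)) (by omega) (by omega) (by omega)
      rwa [hsum] at this
    · -- B's edges ok → every edge A checks ok
      intro hall i hi
      rw [PySem.List.mem_pyRange_one] at hi
      rw [pvAInner_char]
      intro j h1 h2 hcn
      have hmul : 0 ≤ arity * i := mul_nonneg (by omega) (by omega)
      have hfd : PySem.Int.floordiv (arity * i + j - 1) arity = i := by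
        rw [PySem.Int.floordiv_eq_ediv_of_pos (by omega : (0:Int) < arity)]
        have he : arity * i + j - 1 = (j - 1) + arity * i := by ring
        rw [he, Int.add_mul_ediv_left _ _ (by omega : arity ≠ 0),
          Int.ediv_eq_zero_of_lt (by omega) (by omega)]
        ring
      have := hall (arity * i + j) (by rw [PySem.List.mem_pyRange_one]; omega)
      rwa [hfd] at this
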